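-- pv_equiv track=rewrite | github.com/cyrilmichino/Project-Euler | even_fibonacci_numbers.py | even_fibonacci
-- ===== SOURCE A (Python) =====
-- def even_fibonacci(n, a=1,b=2):
--
--     if n == 1:
--         return 0
--
--     elif n == 2:
--         return 2
--
--     else:
--         i = 1
--         even_sum = 2
--
--         while i != n-1:
--             i += 1
--             c = a + b
--             a = b
--             b = c
--
--             if c%2 == 0:
--                 even_sum += c
--
--         return even_sum
-- ===== SOURCE B (Python) =====
-- def even_fibonacci(n, a=1, b=2):
--     if n == 1:
--         return 0
--     if n == 2:
--         return 2
--     m = n - 2  # number of generated terms c_1..c_m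
--     # Triple step (x, y) -> (x+2y, 2x+3y) produces the terms x+y, x+2y, 2x+3y;
--     # which of them are even depends only on (x%2, y%2), which the step preserves,
--     # so one triple step adds a fixed linear form u*x + v*y to the even sum.
--     u, v = even_coeffs(a % 2, b % 2)
--     M = (1, 2, 2, 3, u, v)  # affine map on (x, y, s): (px+qy, rx+ty, ux+vy+s)
--     q, rem = divmod(m, 3)
--     p_, q_, r_, t_, u_, v_ = mat_pow(M, q)
--     x, y, s = p_ * a + q_ * b, r_ * a + t_ * b, u_ * a + v_ * b
--     for _ in range(rem):
--         c = x + y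
--         x, y = y, c
--         if c % 2 == 0:
--             s += c
--     return 2 + s
--
--
-- def compose(m2, m1):
--     # the affine map "apply m1, then m2"
--     p1, q1, r1, s1, u1, v1 = m1
--     p2, q2, r2, s2, u2, v2 = m2
--     return (p2 * p1 + q2 * r1, p2 * q1 + q2 * s1,
--             r2 * p1 + s2 * r1, r2 * q1 + s2 * s1,
--             u2 * p1 + v2 * r1 + u1, u2 * q1 + v2 * s1 + v1)
--
--
-- def mat_pow(M, k):
--     # M^k by binary exponentiation
--     if k == 0:
--         return (1, 0, 0, 1, 0, 0)
--     H = mat_pow(compose(M, M), k // 2)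
--     if k % 2 == 1:
--         H = compose(H, M)
--     return H
--
--
-- def even_coeffs(pa, pb):
--     # which of the three terms of a triple are even, as coefficients (u, v) of x, y
--     if pa == 0 and pb == 0:
--         return (4, 6)
--     if pa == 0:
--         return (1, 2)
--     if pb == 0:
--         return (2, 3)
--     return (1, 1)
-- ===== Notes on version B (the rewrite author's own statement) =====
-- stated objective: faster
-- what changed: Replaces the term-by-term loop with a parity-test per step by binary exponentiation of the affine 'triple step' map (x,y,s) -> (x+2y, 2x+3y, s+u*x+v*y), where (u,v) is fixed once by the parities of a and b (which of the three terms in a triple are even depends only on that, and the triple step preserves the parities), plus at most two remainder steps; Pre_ excludes n <= 0, where A's while loop never terminates.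
import Mathlib
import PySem

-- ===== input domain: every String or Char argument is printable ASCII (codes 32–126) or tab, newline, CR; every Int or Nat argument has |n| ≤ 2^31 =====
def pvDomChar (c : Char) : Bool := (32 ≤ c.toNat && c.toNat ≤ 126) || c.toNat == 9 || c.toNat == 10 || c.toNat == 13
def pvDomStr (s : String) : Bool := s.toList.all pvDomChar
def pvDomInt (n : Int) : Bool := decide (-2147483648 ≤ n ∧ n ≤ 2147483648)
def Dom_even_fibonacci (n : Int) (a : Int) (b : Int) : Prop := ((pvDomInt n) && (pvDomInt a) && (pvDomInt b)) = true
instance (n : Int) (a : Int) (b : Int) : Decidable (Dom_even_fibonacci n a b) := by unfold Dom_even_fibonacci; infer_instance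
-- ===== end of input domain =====

-- B replaces A's term-by-term loop by binary exponentiation of an affine "triple step" map
-- (O(log n) map compositions instead of O(n) loop iterations); equivalence is proved for n ≥ 1
-- (for n ≤ 0 A's while loop never terminates).

-- ===== PORT A =====
-- A's while loop: while i != n-1: i += 1; c = a+b; a = b; b = c; if c % 2 == 0: even_sum += c
-- (the final 'else s' branch is where Python loops forever, i already past n-1; excluded by Pre_)
def aLoop (n i a b s : Int) : Int :=
  if i = n - 1 then s
  else if i < n - 1 then
    aLoop n (i + 1) b (a + b) (if PySem.Int.mod (a + b) 2 = 0 then s + (a + b) else s)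
  else s
termination_by (n - 1 - i).toNat
decreasing_by omega

def even_fibonacci (n : Int) (a : Int) (b : Int) : Int :=
  if n = 1 then 0
  else if n = 2 then 2
  else aLoop n 1 a b 2

-- ===== PORT B =====
-- helper even_coeffs of Source B
def bCoeffs (pa pb : Int) : Int × Int :=
  if pa = 0 ∧ pb = 0 then (4, 6)
  else if pa = 0 then (1, 2)
  else if pb = 0 then (2, 3)
  else (1, 1)

-- helper compose of Source B: the affine map "apply m1, then m2"
def bCompose (m2 m1 : Int × Int × Int × Int × Int × Int) : Int × Int × Int × Int × Int × Int :=
  match m2, m1 with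
  | (p2, q2, r2, s2, u2, v2), (p1, q1, r1, s1, u1, v1) =>
    (p2 * p1 + q2 * r1, p2 * q1 + q2 * s1,
     r2 * p1 + s2 * r1, r2 * q1 + s2 * s1,
     u2 * p1 + v2 * r1 + u1, u2 * q1 + v2 * s1 + v1)

-- helper mat_pow of Source B: M^k by binary exponentiation
def bPow (M : Int × Int × Int × Int × Int × Int) (k : Nat) : Int × Int × Int × Int × Int × Int :=
  if h : k = 0 then (1, 0, 0, 1, 0, 0)
  else
    let H := bPow (bCompose M M) (k / 2)
    if k % 2 = 1 then bCompose H M else H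
termination_by k
decreasing_by exact Nat.div_lt_self (Nat.pos_of_ne_zero h) one_lt_two

-- one iteration of Source B's remainder for-loop body on (x, y, s)
def bStep (t : Int × Int × Int) : Int × Int × Int :=
  (t.2.1, t.1 + t.2.1,
   if PySem.Int.mod (t.1 + t.2.1) 2 = 0 then t.2.2 + (t.1 + t.2.1) else t.2.2)

def even_fibonacci_alt (n : Int) (a : Int) (b : Int) : Int :=
  if n = 1 then 0
  else if n = 2 then 2
  else
    let m := n - 2
    let uv := bCoeffs (PySem.Int.mod a 2) (PySem.Int.mod b 2)
    let M := (1, 2, 2, 3, uv.1, uv.2)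
    let q := PySem.Int.floordiv m 3
    let rem := PySem.Int.mod m 3
    match bPow M q.toNat with
    | (p, q', r, t, u, v) =>
      2 + (bStep^[rem.toNat] (p * a + q' * b, r * a + t * b, u * a + v * b)).2.2

-- ===== PRECONDITION & SPEC =====
-- Pre_ excludes exactly n ≤ 0, where A's while loop (i counting up from 1, stop only at i = n-1) never terminates.
def Pre_even_fibonacci (n : Int) (a : Int) (b : Int) : Prop := 1 ≤ n
instance (n : Int) (a : Int) (b : Int) : Decidable (Pre_even_fibonacci n a b) := by unfold Pre_even_fibonacci; infer_instance
def pvWitness_even_fibonacci : Int × Int × Int := (10, 1, 2)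

def Spec_even_fibonacci (n : Int) (a : Int) (b : Int) (out : Int) : Prop := out = even_fibonacci_alt n a b
instance (n : Int) (a : Int) (b : Int) (out : Int) : Decidable (Spec_even_fibonacci n a b out) := by unfold Spec_even_fibonacci; infer_instance

-- ===== CLAIM (what is proved, stated in full; the proofs are below) =====
def Claim_equal_even_fibonacci : Prop := ∀ (n : Int) (a : Int) (b : Int), Dom_even_fibonacci n a b → Pre_even_fibonacci n a b → Spec_even_fibonacci n a b (even_fibonacci n a b)

-- ===== LEMMAS AND PROOFS =====

-- the affine map encoded by a 6-tuple, applied to a state (x, y, s)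
def applyA (M : Int × Int × Int × Int × Int × Int) (t : Int × Int × Int) : Int × Int × Int :=
  (M.1 * t.1 + M.2.1 * t.2.1,
   M.2.2.1 * t.1 + M.2.2.2.1 * t.2.1,
   M.2.2.2.2.1 * t.1 + M.2.2.2.2.2 * t.2.1 + t.2.2)

lemma applyA_compose (M2 M1 : Int × Int × Int × Int × Int × Int) (t : Int × Int × Int) :
    applyA (bCompose M2 M1) t = applyA M2 (applyA M1 t) := by
  obtain ⟨p2, q2, r2, s2, u2, v2⟩ := M2
  obtain ⟨p1, q1, r1, s1, u1, v1⟩ := M1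
  simp only [bCompose, applyA, Prod.mk.injEq]
  refine ⟨by ring, by ring, by ring⟩

lemma bPow_apply : ∀ (k : Nat) (M : Int × Int × Int × Int × Int × Int) (t : Int × Int × Int),
    applyA (bPow M k) t = (applyA M)^[k] t := by
  intro k
  induction k using Nat.strong_induction_on with
  | _ k ih =>
    intro M t
    rw [bPow]
    by_cases h0 : k = 0
    · subst h0
      simp [applyA]
    · have hlt : k / 2 < k := Nat.div_lt_self (Nat.pos_of_ne_zero h0) one_lt_two
      have hMM : applyA (bCompose M M) = (applyA M)^[2] := by
        funext u
        rw [applyA_compose]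
        rfl
      simp only [dif_neg h0]
      by_cases h1 : k % 2 = 1
      · simp only [if_pos h1]
        rw [applyA_compose, ih _ hlt, hMM, ← Function.iterate_mul,
          ← Function.iterate_succ_apply]
        congr 1
        omega
      · simp only [if_neg h1]
        rw [ih _ hlt, hMM, ← Function.iterate_mul]
        congr 1
        omega

-- A's loop, when it terminates (i + k = n - 1), is k iterations of bStep
lemma aLoop_eq_iter : ∀ (k : Nat) (n i a b s : Int), i + (k : Int) = n - 1 →
    aLoop n i a b s = (bStep^[k] (a, b, s)).2.2 := by
  intro k
  induction k with
  | zero =>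
    intro n i a b s h
    rw [aLoop]
    simp [show i = n - 1 by omega]
  | succ k ih =>
    intro n i a b s h
    rw [aLoop]
    have h1 : ¬ i = n - 1 := by omega
    have h2 : i < n - 1 := by omega
    rw [if_neg h1, if_pos h2, Function.iterate_succ_apply]
    exact ih n (i + 1) b (a + b) _ (by omega)

-- the accumulator passes through bStep iterations additively
lemma iter_s_offset : ∀ (k : Nat) (x y s : Int),
    (bStep^[k] (x, y, s)).2.2 = s + (bStep^[k] (x, y, 0)).2.2 := by
  intro k
  induction k with
  | zero => intro x y s; simp
  | succ k ih =>
    intro x y s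
    rw [Function.iterate_succ_apply, Function.iterate_succ_apply]
    simp only [bStep]
    split_ifs with h
    · rw [ih, ih y (x + y) (0 + (x + y))]
      ring
    · exact ih y (x + y) s

-- one triple step of B equals three single steps of A, given the parity class
lemma triple_step (pa pb x y s : Int)
    (hx : PySem.Int.mod x 2 = pa) (hy : PySem.Int.mod y 2 = pb) :
    applyA (1, 2, 2, 3, (bCoeffs pa pb).1, (bCoeffs pa pb).2) (x, y, s)
      = bStep^[3] (x, y, s) := by
  have h2 : (0 : Int) < 2 := by norm_num
  rw [PySem.Int.mod_eq_emod_of_pos h2] at hx hy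
  have e3 : bStep^[3] (x, y, s) = bStep (bStep (bStep (x, y, s))) := rfl
  rw [e3]
  simp only [bStep, applyA]
  rw [PySem.Int.mod_eq_emod_of_pos h2, PySem.Int.mod_eq_emod_of_pos h2,
    PySem.Int.mod_eq_emod_of_pos h2]
  have hx2 : x % 2 = 0 ∨ x % 2 = 1 := Int.emod_two_eq_zero_or_one x
  have hy2 : y % 2 = 0 ∨ y % 2 = 1 := Int.emod_two_eq_zero_or_one y
  rcases hx2 with hx0 | hx1 <;> rcases hy2 with hy0 | hy1 <;>
    subst hx <;> subst hy <;>
    simp only [bCoeffs] <;>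
    split_ifs with h1 h2' h3 <;>
    simp only [Prod.mk.injEq] <;>
    refine ⟨by ring, by ring, by omega⟩

-- parity class is preserved, so j triple steps equal 3*j single steps
lemma triple_iter (pa pb : Int) : ∀ (j : Nat) (x y s : Int),
    PySem.Int.mod x 2 = pa → PySem.Int.mod y 2 = pb →
    (applyA (1, 2, 2, 3, (bCoeffs pa pb).1, (bCoeffs pa pb).2))^[j] (x, y, s)
      = bStep^[3 * j] (x, y, s) := by
  intro j
  induction j with
  | zero => intro x y s _ _; simp
  | succ j ih =>
    intro x y s hx hy
    have h2 : (0 : Int) < 2 := by norm_num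
    rw [Function.iterate_succ_apply, triple_step pa pb x y s hx hy,
      show 3 * (j + 1) = 3 * j + 3 by ring, Function.iterate_add_apply]
    have e3 : bStep^[3] (x, y, s) = (y + (x + y), (x + y) + (y + (x + y)),
        (bStep^[3] (x, y, s)).2.2) := by
      simp only [show bStep^[3] (x, y, s) = bStep (bStep (bStep (x, y, s))) from rfl, bStep]
    rw [e3]
    apply ih
    · rw [PySem.Int.mod_eq_emod_of_pos h2] at hx ⊢
      omega
    · rw [PySem.Int.mod_eq_emod_of_pos h2] at hy ⊢
      omega

-- ===== VERDICT (by name: the statement is the Claim_ definition above) =====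
theorem even_fibonacci_spec : Claim_equal_even_fibonacci := by
  intro n a b _ hpre
  unfold Spec_even_fibonacci
  by_cases h1 : n = 1
  · simp [even_fibonacci, even_fibonacci_alt, h1]
  by_cases h2 : n = 2
  · simp [even_fibonacci, even_fibonacci_alt, h2]
  have hn3 : 3 ≤ n := by
    have : 1 ≤ n := hpre
    omega
  -- abbreviations matching B's lets
  set m : Int := n - 2 with hm
  set pa : Int := PySem.Int.mod a 2 with hpa
  set pb : Int := PySem.Int.mod b 2 with hpb
  set M : Int × Int × Int × Int × Int × Int :=
    (1, 2, 2, 3, (bCoeffs pa pb).1, (bCoeffs pa pb).2) with hM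
  set q : Int := PySem.Int.floordiv m 3 with hq
  set rem : Int := PySem.Int.mod m 3 with hrem
  -- arithmetic facts
  have hdiv : q * 3 + rem = m := PySem.Int.floordiv_mul_add_mod m 3
  have hrnn : 0 ≤ rem := PySem.Int.mod_nonneg m (by norm_num)
  have hrlt : rem < 3 := PySem.Int.mod_lt m (by norm_num)
  have hm1 : 1 ≤ m := by omega
  have hqnn : 0 ≤ q := by omega
  have hcnt : rem.toNat + 3 * q.toNat = m.toNat := by omega
  -- A's side
  have hA : even_fibonacci n a b = (bStep^[m.toNat] (a, b, 2)).2.2 := by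
    rw [even_fibonacci, if_neg h1, if_neg h2]
    exact aLoop_eq_iter m.toNat n 1 a b 2 (by omega)
  -- B's side
  rcases hP : bPow M q.toNat with ⟨p, q', r, t, u, v⟩
  have hB : even_fibonacci_alt n a b
      = 2 + (bStep^[rem.toNat] (p * a + q' * b, r * a + t * b, u * a + v * b)).2.2 := by
    rw [even_fibonacci_alt]
    rw [if_neg h1, if_neg h2]
    simp only [← hm, ← hpa, ← hpb, ← hM, ← hq, ← hrem, hP]
  have hstate : (p * a + q' * b, r * a + t * b, u * a + v * b)
      = applyA (p, q', r, t, u, v) (a, b, 0) := by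
    simp [applyA]
  rw [hA, hB, hstate, ← hP, bPow_apply, triple_iter pa pb q.toNat a b 0 rfl rfl,
    ← Function.iterate_add_apply, hcnt, iter_s_offset]
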